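-- pv_equiv track=rewrite | github.com/tlim8772/Leetcode | solved/lc3913.py | sortVowels
-- ===== SOURCE A (Python) =====
-- from collections import Counter
--
-- def sortVowels(s: str) -> str:
--     vowels = ['a', 'e', 'i', 'o', 'u']
--     cnter = Counter(s)
--     vowel_cnt = filter(lambda p: p[0] in vowels, cnter.items())
--     sorted_vowel_cnt = sorted(vowel_cnt, key=lambda p: p[1], reverse=True)
--     vowel_str = ''.join(map(lambda p: p[0] * p[1], sorted_vowel_cnt))
--     ptr = 0
--
--     out = []
--     for i in range(len(s)):
--         if s[i] in vowels:
--             out.append(vowel_str[ptr])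
--             ptr += 1
--         else:
--             out.append(s[i])
--     return ''.join(out)
-- ===== SOURCE B (Python) =====
-- from collections import Counter
--
-- def sortVowels(s: str) -> str:
--     vowels = ('a', 'e', 'i', 'o', 'u')
--     occ = [c for c in s if c in vowels]
--     cnt = Counter(occ)
--     occ_sorted = sorted(occ, key=lambda c: (-cnt[c], occ.index(c)))
--     it = iter(occ_sorted)
--     return ''.join(next(it) if c in vowels else c for c in s)
-- ===== Notes on version B (the rewrite author's own statement) =====
-- stated objective: alternative
-- what changed: A sorts the distinct (vowel,count) pairs from a Counter by count descending and re-expands them into a vowel string consumed by an index pointer; B never builds pair/expanded lists: it sorts the vowel occurrence list itself with the tuple key (-count, first-appearance index) and merges it back by consuming an iterator.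
import Mathlib
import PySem

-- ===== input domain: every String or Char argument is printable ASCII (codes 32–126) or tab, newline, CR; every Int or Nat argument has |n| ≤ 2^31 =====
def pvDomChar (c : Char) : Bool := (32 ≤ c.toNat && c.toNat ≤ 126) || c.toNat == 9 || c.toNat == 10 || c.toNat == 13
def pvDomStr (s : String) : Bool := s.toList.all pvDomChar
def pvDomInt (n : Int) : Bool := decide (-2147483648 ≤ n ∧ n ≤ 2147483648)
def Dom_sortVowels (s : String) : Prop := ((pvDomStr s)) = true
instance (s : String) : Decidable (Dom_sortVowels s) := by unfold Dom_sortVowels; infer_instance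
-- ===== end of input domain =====

-- B replaces A's "sort distinct (vowel,count) pairs, expand, refill by index pointer" with
-- "sort the vowel occurrences themselves by (-count, first index) and merge by consuming them";
-- objective: alternative decomposition (same observable result, no speed claim).


-- ===== PORT A =====
def pvVowelsA : List Char := ['a', 'e', 'i', 'o', 'u']

def sortVowels (s : String) : String :=
  let cs := s.toList
  let cnter := PySem.Dict.counter cs
  let vowel_cnt := cnter.items.filter (fun p => pvVowelsA.contains p.1)
  let sorted_vowel_cnt := PySem.List.sorted vowel_cnt (fun p => p.2) true
  let vowel_str := (sorted_vowel_cnt.map (fun p => PySem.List.pyRepeat [p.1] p.2)).flatten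
  -- for i in range(len(s)) with state (out, ptr); s[i] and vowel_str[ptr] are always in
  -- range in Python, so the pyGetD defaults below are unreachable
  let st := (PySem.List.pyRange 0 (PySem.List.len cs)).foldl
    (fun (st : List Char × Int) i =>
      let c := PySem.List.pyGetD cs i ' '
      if pvVowelsA.contains c then
        (st.1 ++ [PySem.List.pyGetD vowel_str st.2 ' '], st.2 + 1)
      else (st.1 ++ [c], st.2))
    ([], 0)
  String.mk st.1

-- ===== PORT B =====
def pvVowelsB : List Char := ['a', 'e', 'i', 'o', 'u']

def sortVowels_alt (s : String) : String :=
  let cs := s.toList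
  let occ := cs.filter (fun c => pvVowelsB.contains c)
  let cnt := PySem.Dict.counter occ
  -- sorted(occ, key=lambda c: (-cnt[c], occ.index(c))); every c comes from occ, so
  -- occ.index(c) never raises and the getD default is unreachable
  let occSorted := PySem.List.sorted2 occ (fun c => -(cnt.getD c 0))
      (fun c => ((PySem.List.index? occ c).getD 0 : Nat)) false
  -- ''.join(next(it) if c in vowels else c for c in s): consume occSorted left to right;
  -- the [] branch is unreachable (one sorted vowel per vowel position)
  let st := cs.foldl
    (fun (st : List Char × List Char) c =>
      if pvVowelsB.contains c then
        match st.2 with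
        | v :: rest => (st.1 ++ [v], rest)
        | [] => (st.1, [])
      else (st.1 ++ [c], st.2))
    ([], occSorted)
  String.mk st.1

-- ===== PRECONDITION & SPEC =====
def Spec_sortVowels (s : String) (out : String) : Prop := out = sortVowels_alt s
instance (s : String) (out : String) : Decidable (Spec_sortVowels s out) := by unfold Spec_sortVowels; infer_instance

-- ===== CLAIM (what is proved, stated in full; the proofs are below) =====
def Claim_equal_sortVowels : Prop := ∀ (s : String), Dom_sortVowels s → Spec_sortVowels s (sortVowels s)

-- ===== LEMMAS AND PROOFS =====

-- first-appearance index of c in l (occ.index(c)), total with unreachable default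
def pvIx (l : List Char) (c : Char) : Nat := (PySem.List.index? l c).getD 0

-- the order in which B's sorted occurrence list is arranged
def pvLeV (occ : List Char) (a b : Char) : Prop :=
  occ.count b < occ.count a ∨ (occ.count a = occ.count b ∧ pvIx occ a < pvIx occ b) ∨ a = b

-- the corresponding order on A's (vowel, count) pairs
def pvLeP (occ : List Char) (p q : Char × Int) : Prop :=
  q.2 < p.2 ∨ (p.2 = q.2 ∧ pvIx occ p.1 < pvIx occ q.1) ∨ p = q

lemma pvLeV_trans (occ : List Char) {a b c : Char}
    (h1 : pvLeV occ a b) (h2 : pvLeV occ b c) : pvLeV occ a c := by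
  unfold pvLeV at *
  rcases h1 with h1 | ⟨h1a, h1b⟩ | rfl
  · rcases h2 with h2 | ⟨h2a, h2b⟩ | rfl
    · exact Or.inl (by omega)
    · exact Or.inl (by omega)
    · exact Or.inl h1
  · rcases h2 with h2 | ⟨h2a, h2b⟩ | rfl
    · exact Or.inl (by omega)
    · exact Or.inr (Or.inl ⟨by omega, by omega⟩)
    · exact Or.inr (Or.inl ⟨h1a, h1b⟩)
  · exact h2

lemma pvLeP_trans (occ : List Char) {p q r : Char × Int}
    (h1 : pvLeP occ p q) (h2 : pvLeP occ q r) : pvLeP occ p r := by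
  unfold pvLeP at *
  rcases h1 with h1 | ⟨h1a, h1b⟩ | rfl
  · rcases h2 with h2 | ⟨h2a, h2b⟩ | rfl
    · exact Or.inl (by omega)
    · exact Or.inl (by omega)
    · exact Or.inl h1
  · rcases h2 with h2 | ⟨h2a, h2b⟩ | rfl
    · exact Or.inl (by omega)
    · exact Or.inr (Or.inl ⟨by omega, by omega⟩)
    · exact Or.inr (Or.inl ⟨h1a, h1b⟩)
  · exact h2

lemma pvIx_inj (l : List Char) {a b : Char} (ha : a ∈ l) (hb : b ∈ l)
    (h : pvIx l a = pvIx l b) : a = b := by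
  have ha' : ∃ k, PySem.List.index? l a = some k := by
    rcases h' : PySem.List.index? l a with _ | k
    · exact absurd ((PySem.List.index?_eq_none_iff l a).1 h') (by simp [ha])
    · exact ⟨k, rfl⟩
  have hb' : ∃ k, PySem.List.index? l b = some k := by
    rcases h' : PySem.List.index? l b with _ | k
    · exact absurd ((PySem.List.index?_eq_none_iff l b).1 h') (by simp [hb])
    · exact ⟨k, rfl⟩
  obtain ⟨ka, hka⟩ := ha'; obtain ⟨kb, hkb⟩ := hb'
  obtain ⟨pre1, suf1, hl1, hlen1, -⟩ := (PySem.List.index?_eq_some_iff l a ka).1 hka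
  obtain ⟨pre2, suf2, hl2, hlen2, -⟩ := (PySem.List.index?_eq_some_iff l b kb).1 hkb
  have hk : ka = kb := by
    unfold pvIx at h; rw [hka, hkb] at h; simpa using h
  have hpre : pre1 = pre2 := by
    have t1 : l.take ka = pre1 := by rw [hl1, ← hlen1, List.take_left]
    have t2 : l.take kb = pre2 := by rw [hl2, ← hlen2, List.take_left]
    rw [← t1, ← t2, hk]
  have : a :: suf1 = b :: suf2 := by
    apply List.append_cancel_left (as := pre1)
    rw [hl1.symm, hpre, hl2]
  exact (List.cons_eq_cons.mp this).1

lemma pv_insertBy_nil {α : Type} (before : α → α → Bool) (x : α) :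
    PySem.List.insertBy before x [] = [x] := rfl

lemma pv_insertBy_cons {α : Type} (before : α → α → Bool) (x y : α) (ys : List α) :
    PySem.List.insertBy before x (y :: ys) =
      if before x y then x :: y :: ys else y :: PySem.List.insertBy before x ys := rfl

-- inserting x into a pairwise-le list stays pairwise-le when x compares against all members
lemma pv_insertBy_pairwise {α : Type} (le : α → α → Prop)
    (htr : ∀ {a b c : α}, le a b → le b c → le a c)
    (before : α → α → Bool) (x : α) : ∀ (ys : List α),
    (∀ y ∈ ys, (before x y = true → le x y) ∧ (before x y = false → le y x)) →
    ys.Pairwise le → (PySem.List.insertBy before x ys).Pairwise le := by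
  intro ys
  induction ys with
  | nil => intro _ _; simp [pv_insertBy_nil]
  | cons y ys ih =>
    intro hx h
    rw [pv_insertBy_cons]
    rcases List.pairwise_cons.1 h with ⟨hy, hys⟩
    by_cases hb : before x y = true
    · simp only [hb, if_true]
      refine List.pairwise_cons.2 ⟨?_, h⟩
      intro z hz
      rcases hz with _ | hz
      · exact (hx y (by simp)).1 hb
      · exact htr ((hx y (by simp)).1 hb) (hy _ (by assumption))
    · simp only [hb]
      refine List.pairwise_cons.2 ⟨?_, ?_⟩
      · intro z hz
        rcases (PySem.List.insertBy_mem_iff before x z ys).1 hz with rfl | hz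
        · exact (hx y (by simp)).2 (by simpa using hb)
        · exact hy _ hz
      · exact ih (fun y' hy' => hx y' (by simp [hy'])) hys

-- the insertion-sort fold is pairwise-le (stability: ties fall back to input order)
lemma pv_foldl_insertBy_pairwise {α : Type} (le : α → α → Prop)
    (htr : ∀ {a b c : α}, le a b → le b c → le a c)
    (before : α → α → Bool) :
    ∀ (xs acc : List α),
      (∀ x ∈ xs, ∀ y ∈ acc, (before x y = true → le x y) ∧ (before x y = false → le y x)) →
      xs.Pairwise (fun a b => (before b a = true → le b a) ∧ (before b a = false → le a b)) →
      acc.Pairwise le →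
      (xs.foldl (fun acc x => PySem.List.insertBy before x acc) acc).Pairwise le := by
  intro hxs
  induction hxs with
  | nil => intro acc _ _ hacc; simpa using hacc
  | cons x xs ih =>
    intro acc hcross hxs hacc
    rcases List.pairwise_cons.1 hxs with ⟨hxhd, hxtl⟩
    simp only [List.foldl_cons]
    apply ih
    · intro z hz y hy
      rcases (PySem.List.insertBy_mem_iff before x y acc).1 hy with rfl | hy
      · exact hxhd z hz
      · exact hcross z (by simp [hz]) y hy
    · exact hxtl
    · exact pv_insertBy_pairwise le htr before x acc (fun y hy => hcross x (by simp) y hy) hacc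

lemma pv_contains_iff (s : List Char) (x : Char) : PySem.Set.contains s x = true ↔ x ∈ s := by
  unfold PySem.Set.contains
  simp

lemma pv_add_eq (s : List Char) (x : Char) :
    PySem.Set.add s x = if x ∈ s then s else s ++ [x] := by
  unfold PySem.Set.add
  by_cases h : x ∈ s
  · rw [if_pos ((pv_contains_iff s x).2 h), if_pos h]
  · rw [if_neg (fun hc => h ((pv_contains_iff s x).1 hc)), if_neg h]

lemma pv_ix_lt_length {l : List Char} {a : Char} (ha : a ∈ l) : pvIx l a < l.length := by
  rcases h' : PySem.List.index? l a with _ | k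
  · exact absurd ((PySem.List.index?_eq_none_iff l a).1 h') (by simp [ha])
  · obtain ⟨pre, suf, hl, hlen, -⟩ := (PySem.List.index?_eq_some_iff l a k).1 h'
    unfold pvIx
    rw [h']
    subst hl
    simp [← hlen]

-- set(l) is listed in strictly increasing first-appearance order
lemma pv_ofList_pairwise_ix (l : List Char) :
    (PySem.Set.ofList l).Pairwise (fun a b => pvIx l a < pvIx l b) := by
  induction l using List.reverseRecOn with
  | nil => simp [PySem.Set.ofList]
  | append_singleton l x ih =>
    have hof : PySem.Set.ofList (l ++ [x]) = PySem.Set.add (PySem.Set.ofList l) x := by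
      rw [PySem.Set.ofList_eq_foldl, PySem.Set.ofList_eq_foldl, List.foldl_append]
      simp
    rw [hof, pv_add_eq]
    have hmem : ∀ a ∈ PySem.Set.ofList l, a ∈ l := fun a ha => (PySem.Set.mem_ofList l a).1 ha
    have hix : ∀ a ∈ PySem.Set.ofList l, pvIx (l ++ [x]) a = pvIx l a := by
      intro a ha
      unfold pvIx
      rw [PySem.List.index?_append_of_mem _ (hmem a ha)]
    have ih' : (PySem.Set.ofList l).Pairwise (fun a b => pvIx (l ++ [x]) a < pvIx (l ++ [x]) b) := by
      refine ih.imp_of_mem ?_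
      intro a b ha hb hab
      rw [hix a ha, hix b hb]; exact hab
    by_cases hx : x ∈ PySem.Set.ofList l
    · rw [if_pos hx]; exact ih'
    · rw [if_neg hx]
      have hxl : x ∉ l := fun h => hx ((PySem.Set.mem_ofList l x).2 h)
      rw [List.pairwise_append]
      refine ⟨ih', by simp, ?_⟩
      intro a ha x' hx'
      rcases List.mem_singleton.1 hx' with rfl
      rw [hix a ha]
      have hxx : pvIx (l ++ [x']) x' = l.length := by
        unfold pvIx
        rw [PySem.List.index?_append_singleton_self l x' hxl]
        rfl
      rw [hxx]
      exact pv_ix_lt_length (hmem a ha)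

-- filtering commutes with set-of-list formation
lemma pv_filter_foldl_add (p : Char → Bool) :
    ∀ (cs acc : List Char),
      (cs.foldl PySem.Set.add acc).filter p = (cs.filter p).foldl PySem.Set.add (acc.filter p) := by
  intro cs
  induction cs with
  | nil => intro acc; simp
  | cons x cs ih =>
    intro acc
    have key : (PySem.Set.add acc x).filter p =
        if p x then PySem.Set.add (acc.filter p) x else acc.filter p := by
      rw [pv_add_eq, pv_add_eq]
      by_cases hx : x ∈ acc
      · rw [if_pos hx]
        by_cases hp : p x
        · rw [if_pos hp, if_pos (List.mem_filter.2 ⟨hx, hp⟩)]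
        · rw [if_neg hp]
      · rw [if_neg hx]
        by_cases hp : p x
        · rw [if_pos hp, List.filter_append,
            if_neg (fun h => hx (List.mem_filter.1 h).1)]
          simp [hp]
        · rw [if_neg hp, List.filter_append]
          simp [hp]
    simp only [List.foldl_cons, List.filter_cons]
    by_cases hp : p x
    · simp only [hp, if_true, List.foldl_cons]
      rw [ih, key]; simp [hp]
    · simp only [hp]
      rw [ih, key]; simp [hp]

lemma pv_ofList_filter (p : Char → Bool) (cs : List Char) :
    (PySem.Set.ofList cs).filter p = PySem.Set.ofList (cs.filter p) := by
  rw [PySem.Set.ofList_eq_foldl, PySem.Set.ofList_eq_foldl, pv_filter_foldl_add]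
  simp

-- counts: sum over a nodup support list
lemma pv_sum_map_ite {D : List Char} (hD : D.Nodup) (g : Char → Nat) (x : Char) :
    (D.map (fun k => if k = x then g k else 0)).sum = if x ∈ D then g x else 0 := by
  induction D with
  | nil => simp
  | cons d D ih =>
    rcases List.nodup_cons.1 hD with ⟨hd, hD'⟩
    simp only [List.map_cons, List.sum_cons, ih hD']
    by_cases hdx : d = x
    · subst hdx
      simp [hd]
    · simp [hdx, Ne.symm hdx]

-- a nodup enumeration of the support, expanded by multiplicities, is a permutation
lemma pv_flatMap_replicate_perm (occ D : List Char) (hD : D.Nodup)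
    (hmem : ∀ c, c ∈ D ↔ c ∈ occ) :
    (D.flatMap (fun c => List.replicate (occ.count c) c)).Perm occ := by
  rw [List.perm_iff_count]
  intro x
  rw [List.count_flatMap]
  have : (List.map (List.count x ∘ fun c => List.replicate (occ.count c) c) D).sum
      = (D.map (fun k => if k = x then occ.count k else 0)).sum := by
    congr 1
    apply List.map_congr_left
    intro c _
    by_cases h : c = x
    · subst h; simp
    · simp [List.count_replicate, h]
  rw [this, pv_sum_map_ite hD]
  by_cases hx : x ∈ D
  · simp [hx]
  · simp [hx]
    exact (List.count_eq_zero.2 (fun h => hx ((hmem x).2 h))).symm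

-- the two merge loops agree while the supply list is long enough
lemma pv_merge_eq (v : Char → Bool) :
    ∀ (cs w o : List Char) (k : Nat), k + cs.countP v ≤ w.length →
      ((cs.foldl (fun (st : List Char × Int) c =>
          if v c then (st.1 ++ [PySem.List.pyGetD w st.2 ' '], st.2 + 1)
          else (st.1 ++ [c], st.2)) (o, (k : Int))).1 : List Char)
      = (cs.foldl (fun (st : List Char × List Char) c =>
          if v c then
            (match st.2 with
             | v' :: rest => (st.1 ++ [v'], rest)
             | [] => (st.1, []))
          else (st.1 ++ [c], st.2)) (o, w.drop k)).1 := by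
  intro cs
  induction cs with
  | nil => intro w o k h; simp
  | cons c cs ih =>
    intro w o k h
    simp only [List.foldl_cons, List.countP_cons] at *
    by_cases hv : v c
    · simp only [hv, if_true] at h ⊢
      have hk : k < w.length := by omega
      have hdrop : w.drop k = w[k] :: w.drop (k + 1) := List.drop_eq_getElem_cons hk
      have hget : PySem.List.pyGetD w (k : Int) ' ' = w[k] := by
        rw [PySem.List.pyGetD_natCast]
        simp [List.getD, hk]
      rw [hdrop]
      simp only [hget]
      have hcast : ((k : Int) + 1) = ((k + 1 : Nat) : Int) := by push_cast; ring
      rw [hcast]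
      exact ih w (o ++ [w[k]]) (k + 1) (by omega)
    · simp only [hv] at h ⊢
      exact ih w (o ++ [c]) k (by omega)

-- B's sorted occurrence list is arranged by pvLeV
lemma pv_B_pairwise (occ : List Char) :
    (PySem.List.sorted2 occ (fun c => -((PySem.Dict.counter occ).getD c 0))
      (fun c => ((PySem.List.index? occ c).getD 0 : Nat)) false).Pairwise (pvLeV occ) := by
  have hunfold : PySem.List.sorted2 occ (fun c => -((PySem.Dict.counter occ).getD c 0))
      (fun c => ((PySem.List.index? occ c).getD 0 : Nat)) false
      = occ.foldl (fun acc x => PySem.List.insertBy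
          (fun a b =>
            decide ((-((PySem.Dict.counter occ).getD a 0)) < -((PySem.Dict.counter occ).getD b 0)) ||
            (!decide ((-((PySem.Dict.counter occ).getD b 0)) < -((PySem.Dict.counter occ).getD a 0)) &&
              decide (((PySem.List.index? occ a).getD 0 : Nat) < ((PySem.List.index? occ b).getD 0 : Nat)))) x acc) [] := rfl
  rw [hunfold]
  apply pv_foldl_insertBy_pairwise (pvLeV occ) (pvLeV_trans occ)
  · intro x _ y hy; cases hy
  · apply List.pairwise_of_forall_mem_list
    intro a ha b hb
    have hca : (PySem.Dict.counter occ).getD a 0 = (occ.count a : Int) := PySem.Dict.getD_counter occ a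
    have hcb : (PySem.Dict.counter occ).getD b 0 = (occ.count b : Int) := PySem.Dict.getD_counter occ b
    constructor
    · intro h
      simp only [hca, hcb, Bool.or_eq_true, Bool.and_eq_true, Bool.not_eq_eq_eq_not,
        Bool.not_true, decide_eq_true_eq, decide_eq_false_iff_not] at h
      unfold pvLeV
      rcases h with h | ⟨h1, h2⟩
      · exact Or.inl (by omega)
      · by_cases hc : occ.count a < occ.count b
        · exact Or.inl hc
        · exact Or.inr (Or.inl ⟨by omega, h2⟩)
    · intro h
      simp only [hca, hcb, Bool.or_eq_false_iff, Bool.and_eq_false_iff, Bool.not_eq_eq_eq_not,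
        Bool.not_false, decide_eq_false_iff_not, decide_eq_true_eq] at h
      unfold pvLeV
      rcases h with ⟨h1, h2⟩
      by_cases hc : occ.count b < occ.count a
      · exact Or.inl hc
      · rcases h2 with h2 | h2
        · exact Or.inl (by omega)
        · by_cases hix : pvIx occ a < pvIx occ b
          · exact Or.inr (Or.inl ⟨by omega, hix⟩)
          · have : pvIx occ a = pvIx occ b := by
              unfold pvIx at *
              omega
            exact Or.inr (Or.inr (pvIx_inj occ ha hb this))
  · exact List.Pairwise.nil

-- A's reverse-sorted pair list is arranged by pvLeP (stable ties follow first appearance)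
lemma pv_A_pairwise (occ : List Char) (L : List (Char × Int))
    (hL : L.Pairwise (fun p q => pvIx occ p.1 < pvIx occ q.1)) :
    (PySem.List.sorted L (fun p => p.2) true).Pairwise (pvLeP occ) := by
  rw [PySem.List.sorted_rev_eq_foldl_insertBy]
  apply pv_foldl_insertBy_pairwise (pvLeP occ) (pvLeP_trans occ)
  · intro x _ y hy; cases hy
  · refine hL.imp ?_
    intro p q hix
    constructor
    · intro h
      exact Or.inl (of_decide_eq_true h)
    · intro h
      have h' := of_decide_eq_false h
      by_cases hlt : q.2 < p.2
      · exact Or.inl hlt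
      · exact Or.inr (Or.inl ⟨by omega, hix⟩)
  · exact List.Pairwise.nil


-- membership/count facts about A's filtered counter items, and the final assembly
lemma pv_main (cs : List Char) :
    ((PySem.List.pyRange 0 (PySem.List.len cs)).foldl
      (fun (st : List Char × Int) i =>
        if pvVowelsA.contains (PySem.List.pyGetD cs i ' ') then
          (st.1 ++ [PySem.List.pyGetD
            ((PySem.List.sorted ((PySem.Dict.counter cs).items.filter
                (fun p => pvVowelsA.contains p.1)) (fun p => p.2) true).map
              (fun p => PySem.List.pyRepeat [p.1] p.2)).flatten st.2 ' '], st.2 + 1)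
        else (st.1 ++ [PySem.List.pyGetD cs i ' '], st.2)) ([], 0)).1
    = (cs.foldl
        (fun (st : List Char × List Char) c =>
          if pvVowelsA.contains c then
            (match st.2 with
             | v :: rest => (st.1 ++ [v], rest)
             | [] => (st.1, []))
          else (st.1 ++ [c], st.2))
        ([], PySem.List.sorted2 (cs.filter (fun c => pvVowelsA.contains c))
              (fun c => -((PySem.Dict.counter (cs.filter (fun c => pvVowelsA.contains c))).getD c 0))
              (fun c => ((PySem.List.index? (cs.filter (fun c => pvVowelsA.contains c)) c).getD 0 : Nat)) false)).1 := by
  set occ := cs.filter (fun c => pvVowelsA.contains c) with hocc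
  set L := (PySem.Dict.counter cs).items.filter (fun p => pvVowelsA.contains p.1) with hL
  set AP := PySem.List.sorted L (fun p => p.2) true with hAP
  set vstr := (AP.map (fun p => PySem.List.pyRepeat [p.1] p.2)).flatten with hvstr
  set OS := PySem.List.sorted2 occ (fun c => -((PySem.Dict.counter occ).getD c 0))
      (fun c => ((PySem.List.index? occ c).getD 0 : Nat)) false with hOS
  -- characterize A's filtered counter items
  have F1 : L = (PySem.Set.ofList occ).map (fun k => (k, (cs.count k : Int))) := by
    rw [hL, PySem.Dict.items_counter, List.filter_map]
    show ((PySem.Set.ofList cs).filter (fun c => pvVowelsA.contains c)).map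
        (fun k => (k, (cs.count k : Int))) = _
    rw [pv_ofList_filter]
  have F2 : ∀ p ∈ L, p.1 ∈ occ ∧ p.2 = (occ.count p.1 : Int) := by
    intro p hp
    rw [F1] at hp
    obtain ⟨k, hk, rfl⟩ := List.mem_map.1 hp
    have hkocc : k ∈ occ := (PySem.Set.mem_ofList occ k).1 hk
    have hcount : occ.count k = cs.count k := by
      rw [hocc]
      exact List.count_filter (List.of_mem_filter (hocc ▸ hkocc))
    exact ⟨hkocc, by simp [hcount]⟩
  have F3 : L.Pairwise (fun p q => pvIx occ p.1 < pvIx occ q.1) := by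
    rw [F1]
    exact List.pairwise_map.2 (pv_ofList_pairwise_ix occ)
  have F4 : AP.Pairwise (pvLeP occ) := by
    rw [hAP]; exact pv_A_pairwise occ L F3
  have F5 : ∀ p ∈ AP, p.1 ∈ occ ∧ p.2 = (occ.count p.1 : Int) := by
    intro p hp
    exact F2 p ((PySem.List.mem_sorted L (fun p => p.2) true p).1 (hAP ▸ hp))
  have F6 : vstr = AP.flatMap (fun p => List.replicate p.2.toNat p.1) := by
    rw [hvstr, ← List.flatMap_def]
    simp only [PySem.List.pyRepeat_singleton]
  have F7 : vstr.Pairwise (pvLeV occ) := by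
    rw [F6]
    refine List.pairwise_flatMap.2 ⟨?_, ?_⟩
    · intro p _
      apply List.pairwise_of_forall_mem_list
      intro x hx y hy
      exact Or.inr (Or.inr (by rw [List.eq_of_mem_replicate hx, List.eq_of_mem_replicate hy]))
    · refine F4.imp_of_mem ?_
      intro p q hp hq hpq x hx y hy
      rw [List.eq_of_mem_replicate hx, List.eq_of_mem_replicate hy]
      obtain ⟨hp1, hp2⟩ := F5 p hp
      obtain ⟨hq1, hq2⟩ := F5 q hq
      rcases hpq with h | ⟨h1, h2⟩ | rfl
      · refine Or.inl ?_
        rw [hp2, hq2] at h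
        exact_mod_cast h
      · refine Or.inr (Or.inl ⟨?_, h2⟩)
        rw [hp2, hq2] at h1
        exact_mod_cast h1
      · exact Or.inr (Or.inr rfl)
  have F8 : vstr.Perm occ := by
    rw [F6]
    have h1 : (AP.flatMap (fun p => List.replicate p.2.toNat p.1)).Perm
        (L.flatMap (fun p => List.replicate p.2.toNat p.1)) :=
      List.Perm.flatMap (hAP ▸ PySem.List.sorted_perm L (fun p => p.2) true) (fun a _ => List.Perm.refl _)
    have h2 : L.flatMap (fun p => List.replicate p.2.toNat p.1)
        = (PySem.Set.ofList occ).flatMap (fun k => List.replicate (occ.count k) k) := by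
      rw [F1, List.flatMap_map, List.flatMap_def, List.flatMap_def]
      congr 1
      apply List.map_congr_left
      intro k hk
      have hkocc : k ∈ occ := (PySem.Set.mem_ofList occ k).1 hk
      have hcount : occ.count k = cs.count k := by
        rw [hocc]
        exact List.count_filter (List.of_mem_filter (hocc ▸ hkocc))
      simp [hcount]
    rw [h2] at h1
    exact h1.trans (pv_flatMap_replicate_perm occ (PySem.Set.ofList occ)
      (PySem.Set.nodup_ofList occ) (fun c => PySem.Set.mem_ofList occ c))
  have F9 : OS.Pairwise (pvLeV occ) := by rw [hOS]; exact pv_B_pairwise occ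
  have F10 : OS.Perm occ := by rw [hOS]; exact PySem.List.sorted2_perm occ _ _ false
  have F11 : vstr = OS := by
    refine List.Perm.eq_of_pairwise ?_ F7 F9 (F8.trans F10.symm)
    intro a b _ _ h1 h2
    rcases h1 with h1 | ⟨h1a, h1b⟩ | rfl
    · rcases h2 with h2 | ⟨h2a, h2b⟩ | rfl
      · exact ((by omega : False)).elim
      · exact ((by omega : False)).elim
      · exact ((by omega : False)).elim
    · rcases h2 with h2 | ⟨h2a, h2b⟩ | rfl
      · exact ((by omega : False)).elim
      · exact ((by omega : False)).elim
      · exact ((by omega : False)).elim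
    · rfl
  have Flen : cs.countP (fun c => pvVowelsA.contains c) ≤ vstr.length := by
    rw [F8.length_eq, hocc, ← List.countP_eq_length_filter]
  -- turn the range-indexed loop into a loop over the characters
  rw [PySem.List.foldl_pyRange_pyGetD cs ' '
    (fun (st : List Char × Int) c =>
      if pvVowelsA.contains c then
        (st.1 ++ [PySem.List.pyGetD vstr st.2 ' '], st.2 + 1)
      else (st.1 ++ [c], st.2)) ([], 0) (le_refl 0)]
  have hdrop0 : List.drop (Int.toNat 0) cs = cs := by simp
  rw [hdrop0]
  -- the two merge loops agree
  have hmain := pv_merge_eq (fun c => pvVowelsA.contains c) cs vstr [] 0 (by omega)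
  simp only [Nat.cast_zero, List.drop_zero] at hmain
  rw [hmain, F11]

-- ===== VERDICT (by name: the statement is the Claim_ definition above) =====
theorem sortVowels_spec : Claim_equal_sortVowels := by
  intro s _
  unfold Spec_sortVowels
  exact congrArg String.mk (pv_main s.toList)
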